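-- pv_equiv track=rewrite | github.com/BrigadeMagpie/CompareSBV | src/overlap.py | _parse_diff_to_blocks
-- ===== SOURCE A (Python) =====
-- def _parse_diff_to_blocks(diff):
--   if not diff:
--     return ([], [])
--   b1 = []
--   b2 = []
--
--   for d in diff:
--     code = d[0]
--     s = d[2:]
--     if code == ' ':
--       b1.append(s)
--       b2.append(s)
--     elif code == '-':
--       b1.append(s)
--     elif code == '+':
--       b2.append(s)
--
--   return (b1, b2)
-- ===== SOURCE B (Python) =====
-- def _parse_diff_to_blocks(diff):
--   b1 = [d[2:] for d in diff if d[0] in ' -']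
--   b2 = [d[2:] for d in diff if d[0] in ' +']
--   return (b1, b2)
-- ===== Notes on version B (the rewrite author's own statement) =====
-- stated objective: simpler
-- what changed: Replaces the single accumulator loop with three branches (plus an explicit empty-diff guard) by two independent filtered comprehensions, one per output block.
import Mathlib
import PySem

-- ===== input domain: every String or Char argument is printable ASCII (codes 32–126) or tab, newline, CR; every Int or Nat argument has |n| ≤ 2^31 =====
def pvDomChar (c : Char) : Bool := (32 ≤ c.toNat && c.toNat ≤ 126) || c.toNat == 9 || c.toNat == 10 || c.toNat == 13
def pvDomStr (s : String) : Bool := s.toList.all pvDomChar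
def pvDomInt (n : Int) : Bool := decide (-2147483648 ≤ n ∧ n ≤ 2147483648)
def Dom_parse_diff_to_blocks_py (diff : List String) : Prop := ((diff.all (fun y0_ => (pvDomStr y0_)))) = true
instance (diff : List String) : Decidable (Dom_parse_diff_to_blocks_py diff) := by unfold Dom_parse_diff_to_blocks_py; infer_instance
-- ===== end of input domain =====

-- B replaces A's single three-branch accumulator loop (with its empty-diff guard) by two
-- independent filtered comprehensions, one per block (objective: simpler).

-- ===== PORT A =====
-- one loop step: code = d[0]; s = d[2:]; three branches appending to b1/b2
def pvStepA (st : List String × List String) (d : String) : List String × List String :=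
  match PySem.Str.pyGet? d 0 with
  | none => st              -- d[0] raises IndexError in Python; excluded by Pre_
  | some code =>
    let s := PySem.Str.slice d (some 2) none
    if code = ' ' then (st.1 ++ [s], st.2 ++ [s])
    else if code = '-' then (st.1 ++ [s], st.2)
    else if code = '+' then (st.1, st.2 ++ [s])
    else st

def parse_diff_to_blocks_py (diff : List String) : List String × List String :=
  if diff = [] then ([], [])
  else diff.foldl pvStepA ([], [])

-- ===== PORT B =====
-- d[0] in ' -' / d[0] in ' +'
def pvKeep1 (d : String) : Bool :=
  match PySem.Str.pyGet? d 0 with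
  | none => false           -- d[0] raises in Python; excluded by Pre_
  | some c => c == ' ' || c == '-'

def pvKeep2 (d : String) : Bool :=
  match PySem.Str.pyGet? d 0 with
  | none => false
  | some c => c == ' ' || c == '+'

def parse_diff_to_blocks_py_alt (diff : List String) : List String × List String :=
  ((diff.filter pvKeep1).map (fun d => PySem.Str.slice d (some 2) none),
   (diff.filter pvKeep2).map (fun d => PySem.Str.slice d (some 2) none))

-- ===== PRECONDITION & SPEC =====
-- Pre_ excludes lists containing an empty string: there d[0] raises IndexError in both A and B.
def Pre_parse_diff_to_blocks_py (diff : List String) : Prop := ∀ s ∈ diff, s ≠ ""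
instance (diff : List String) : Decidable (Pre_parse_diff_to_blocks_py diff) := by unfold Pre_parse_diff_to_blocks_py; infer_instance
def pvWitness_parse_diff_to_blocks_py : List String := ["  x", "- y", "+ z", "? q"]

def Spec_parse_diff_to_blocks_py (diff : List String) (out : List String × List String) : Prop := out = parse_diff_to_blocks_py_alt diff
instance (diff : List String) (out : List String × List String) : Decidable (Spec_parse_diff_to_blocks_py diff out) := by unfold Spec_parse_diff_to_blocks_py; infer_instance

-- ===== CLAIM (what is proved, stated in full; the proofs are below) =====
def Claim_equal_parse_diff_to_blocks_py : Prop := ∀ (diff : List String), Dom_parse_diff_to_blocks_py diff → Pre_parse_diff_to_blocks_py diff → Spec_parse_diff_to_blocks_py diff (parse_diff_to_blocks_py diff)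

-- ===== LEMMAS AND PROOFS =====

-- loop invariant: folding A's step from accumulator (b1, b2) appends exactly B's two filtered maps
theorem pvFold_eq (diff : List String) : ∀ (b1 b2 : List String),
    diff.foldl pvStepA (b1, b2) =
      (b1 ++ (diff.filter pvKeep1).map (fun d => PySem.Str.slice d (some 2) none),
       b2 ++ (diff.filter pvKeep2).map (fun d => PySem.Str.slice d (some 2) none)) := by
  induction diff with
  | nil => simp
  | cons d rest ih =>
    intro b1 b2
    rw [List.foldl_cons]
    cases h : PySem.List.pyGet? d.toList 0 with
    | none => simp [pvStepA, pvKeep1, pvKeep2, PySem.Str.pyGet?, h, ih]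
    | some c =>
      by_cases h1 : c = ' ' <;> by_cases h2 : c = '-' <;> by_cases h3 : c = '+' <;>
        simp [pvStepA, pvKeep1, pvKeep2, PySem.Str.pyGet?, h, h1, h2, h3, ih, List.filter_cons]

-- ===== VERDICT (by name: the statement is the Claim_ definition above) =====
theorem parse_diff_to_blocks_py_spec : Claim_equal_parse_diff_to_blocks_py := by
  intro diff _ _
  unfold Spec_parse_diff_to_blocks_py parse_diff_to_blocks_py parse_diff_to_blocks_py_alt
  split
  · subst ‹diff = []›; simp
  · rw [pvFold_eq]; simp
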